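-- pv_equiv track=rewrite | github.com/bomba5/MasterMind | common.py | findCloseMatch
-- ===== SOURCE A (Python) =====
-- def findCloseMatch (current, guess):
--     """
--         Finds the sum of mismatched but present pins
--     """
--     close = 0
--
--     # Remove matched pins
--     l_current = [a for (a, b) in zip (current, guess) if a != b]
--     l_guess = [b for (a, b) in zip (current, guess) if a != b]
--
--     for possible in l_guess:
--         if possible in l_current:
--             del l_current[l_current.index(possible)]
--             close += 1
--
--     # Return number of close matches
--     return close
-- ===== SOURCE B (Python) =====
-- def findCloseMatch(current, guess):
--     """
--         Finds the sum of mismatched but present pins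
--     """
--     exact = 0
--     cc = {}
--     cg = {}
--     for a, b in zip(current, guess):
--         if a == b:
--             exact += 1
--         cc[a] = cc.get(a, 0) + 1
--         cg[b] = cg.get(b, 0) + 1
--     # total colour overlap; subtracting the exact matches leaves the close ones,
--     # since per colour min(C, G) = min(C - E, G - E) + E
--     total = sum(min(cc[c], cg.get(c, 0)) for c in cc)
--     return total - exact
-- ===== Notes on version B (the rewrite author's own statement) =====
-- stated objective: faster
-- what changed: Replaced A's filter-then-consume loop (per guess pin: membership test, index, delete) by one counting pass over the zipped pairs, returning the total per-colour overlap sum(min) minus the exact matches.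
import Mathlib
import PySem

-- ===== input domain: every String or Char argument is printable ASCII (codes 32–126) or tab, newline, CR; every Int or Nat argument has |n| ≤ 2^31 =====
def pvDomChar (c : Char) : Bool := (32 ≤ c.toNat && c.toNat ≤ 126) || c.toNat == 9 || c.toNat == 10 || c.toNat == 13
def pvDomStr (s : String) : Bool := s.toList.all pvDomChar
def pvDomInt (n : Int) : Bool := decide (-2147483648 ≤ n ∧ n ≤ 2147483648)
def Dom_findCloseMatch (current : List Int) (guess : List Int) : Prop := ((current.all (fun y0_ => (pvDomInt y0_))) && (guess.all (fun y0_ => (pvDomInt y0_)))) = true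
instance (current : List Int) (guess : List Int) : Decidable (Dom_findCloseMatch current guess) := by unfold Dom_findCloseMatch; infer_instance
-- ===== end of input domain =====

-- B replaces A's filter-then-consume loop by one counting pass and the identity
-- "close = total colour overlap - exact matches" (alternative algorithm, same result).

-- ===== PORT A =====
-- 'del l_current[l_current.index(possible)]' deletes the first occurrence = List.erase
def findCloseMatch (current : List Int) (guess : List Int) : Int :=
  let close : Int := 0
  let lCurrent := ((current.zip guess).filter (fun p => p.1 != p.2)).map Prod.fst
  let lGuess := ((current.zip guess).filter (fun p => p.1 != p.2)).map Prod.snd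
  let st := lGuess.foldl
    (fun (st : List Int × Int) possible =>
      if possible ∈ st.1 then (st.1.erase possible, st.2 + 1) else st)
    (lCurrent, close)
  st.2

-- ===== PORT B =====
-- one pass over zip(current, guess): 'cc[a] = cc.get(a, 0) + 1' is Dict.modify;
-- 'for c in cc' iterates the keys, 'cc[c]' with c a key of cc is getD c 0
def findCloseMatch_alt (current : List Int) (guess : List Int) : Int :=
  let st := (current.zip guess).foldl
    (fun (st : Int × PySem.Dict Int Int × PySem.Dict Int Int) p =>
      (if p.1 = p.2 then st.1 + 1 else st.1,
       st.2.1.modify p.1 0 (· + 1),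
       st.2.2.modify p.2 0 (· + 1)))
    (0, PySem.Dict.empty, PySem.Dict.empty)
  let total := st.2.1.keys.foldl
    (fun acc c => acc + min (st.2.1.getD c 0) (st.2.2.getD c 0)) 0
  total - st.1

-- ===== PRECONDITION & SPEC =====
def Spec_findCloseMatch (current : List Int) (guess : List Int) (out : Int) : Prop := out = findCloseMatch_alt current guess
instance (current : List Int) (guess : List Int) (out : Int) : Decidable (Spec_findCloseMatch current guess out) := by unfold Spec_findCloseMatch; infer_instance

-- ===== CLAIM (what is proved, stated in full; the proofs are below) =====
def Claim_equal_findCloseMatch : Prop := ∀ (current : List Int) (guess : List Int), Dom_findCloseMatch current guess → Spec_findCloseMatch current guess (findCloseMatch current guess)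

-- ===== LEMMAS AND PROOFS =====

-- A's consume loop, as a structural recursion on the guess residue
def pvConsume : List Int → List Int → Nat
  | _, [] => 0
  | lc, g :: gs => if g ∈ lc then 1 + pvConsume (lc.erase g) gs else pvConsume lc gs

theorem pvA_fold (lg : List Int) (lc : List Int) (k : Int) :
    (lg.foldl (fun (st : List Int × Int) possible =>
        if possible ∈ st.1 then (st.1.erase possible, st.2 + 1) else st) (lc, k)).2
      = k + (pvConsume lc lg : Int) := by
  induction lg generalizing lc k with
  | nil => simp [pvConsume]
  | cons g gs ih =>
    by_cases h : g ∈ lc <;> simp [pvConsume, h, ih] <;> ring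

theorem pvConsume_card (lg : List Int) (lc : List Int) :
    pvConsume lc lg = ((lc : Multiset Int) ∩ (lg : Multiset Int)).card := by
  induction lg generalizing lc with
  | nil => simp [pvConsume]
  | cons g gs ih =>
    by_cases h : g ∈ lc
    · have hc : 0 < lc.count g := List.count_pos_iff.mpr h
      have key : (lc : Multiset Int) ∩ (↑(g :: gs)) = g ::ₘ ((↑(lc.erase g) : Multiset Int) ∩ ↑gs) := by
        ext a
        simp only [Multiset.count_cons, Multiset.count_inter, Multiset.coe_count,
          List.count_cons, List.count_erase]
        by_cases hag : g = a
        · subst hag; simp; omega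
        · simp [hag, Ne.symm hag]
      rw [show pvConsume lc (g :: gs) = 1 + pvConsume (lc.erase g) gs from by rw [pvConsume, if_pos h],
          key, Multiset.card_cons, ih]
      omega
    · have hc : lc.count g = 0 := by rw [List.count_eq_zero]; exact h
      have key : (lc : Multiset Int) ∩ (↑(g :: gs)) = (lc : Multiset Int) ∩ ↑gs := by
        ext a
        simp only [Multiset.count_inter, Multiset.coe_count, List.count_cons]
        by_cases hag : g = a
        · subst hag; simp [hc]
        · simp [hag]
      rw [show pvConsume lc (g :: gs) = pvConsume lc gs from by rw [pvConsume, if_neg h], key, ih]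

-- B's single pass, split into its three components
theorem pvB_fold (P : List (Int × Int)) (e : Int) (cc cg : PySem.Dict Int Int) :
    P.foldl (fun (st : Int × PySem.Dict Int Int × PySem.Dict Int Int) p =>
        (if p.1 = p.2 then st.1 + 1 else st.1,
         st.2.1.modify p.1 0 (· + 1),
         st.2.2.modify p.2 0 (· + 1))) (e, cc, cg)
      = (e + (P.countP (fun p => p.1 == p.2) : Int),
         (P.map Prod.fst).foldl (fun d x => d.modify x 0 (· + 1)) cc,
         (P.map Prod.snd).foldl (fun d x => d.modify x 0 (· + 1)) cg) := by
  induction P generalizing e cc cg with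
  | nil => simp
  | cons p P ih =>
    by_cases h : p.1 = p.2 <;> simp [h, ih] <;> ring

-- a sum of casts is the cast of the sum
theorem pvSum_cast (ks : List Int) (f : Int → Nat) :
    (ks.map (fun c => ((f c : Nat) : Int))).sum = ((ks.map f).sum : Int) := by
  induction ks with
  | nil => simp
  | cons k ks ih => simp [ih]

-- the per-colour overlap sum equals the cardinality of the multiset intersection
theorem pvSum_min_counts (xs ys : List Int) :
    ((PySem.Set.ofList xs).map (fun c => min (xs.count c) (ys.count c))).sum
      = ((xs : Multiset Int) ∩ (ys : Multiset Int)).card := by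
  have hnd := PySem.Set.nodup_ofList xs
  have hfin : (PySem.Set.ofList xs).toFinset = xs.toFinset := by
    ext a; simp [PySem.Set.mem_ofList]
  have hsum : ((PySem.Set.ofList xs).map (fun c => min (xs.count c) (ys.count c))).sum
      = ∑ c ∈ xs.toFinset, min (xs.count c) (ys.count c) := by
    rw [← hfin, List.sum_toFinset _ hnd]
  rw [hsum]
  have hcongr : ∑ c ∈ xs.toFinset, min (xs.count c) (ys.count c)
      = ∑ c ∈ xs.toFinset, ((xs : Multiset Int) ∩ ↑ys).count c := by
    refine Finset.sum_congr rfl ?_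
    intro a _
    simp [Multiset.count_inter]
  rw [hcongr, ← Multiset.toFinset_sum_count_eq ((xs : Multiset Int) ∩ ↑ys)]
  refine (Finset.sum_subset ?_ ?_).symm
  · intro a ha
    have h1 : a ∈ (xs : Multiset Int) ∩ ↑ys := by simpa using ha
    have h2 : a ∈ (xs : Multiset Int) := Multiset.mem_of_le Multiset.inter_le_left h1
    simpa using h2
  · intro a _ ha
    have h0 : a ∉ (xs : Multiset Int) ∩ ↑ys := by simpa using ha
    exact Multiset.count_eq_zero.mpr h0

-- splitting the zipped pairs into exactly-matched and mismatched parts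
theorem pvSplit (P : List (Int × Int)) (f : Int × Int → Int) :
    (↑(P.map f) : Multiset Int)
      = ↑((P.filter (fun p => p.1 == p.2)).map f) + ↑((P.filter (fun p => p.1 != p.2)).map f) := by
  have hperm : ((P.filter (fun p => p.1 == p.2) ++ P.filter (fun p => p.1 != p.2)).map f).Perm (P.map f) := by
    refine List.Perm.map f ?_
    simpa [bne] using List.filter_append_perm (fun p : Int × Int => p.1 == p.2) P
  rw [← Multiset.coe_eq_coe.mpr hperm]
  simp

-- on the matched part, fst and snd agree
theorem pvEq_part (P : List (Int × Int)) :
    (P.filter (fun p => p.1 == p.2)).map Prod.fst = (P.filter (fun p => p.1 == p.2)).map Prod.snd := by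
  refine List.map_congr_left ?_
  intro p hp
  have := (List.mem_filter.mp hp).2
  simpa using this

theorem pvInter_add (m a b : Multiset Int) : (m + a) ∩ (m + b) = m + a ∩ b := by
  ext c
  simp only [Multiset.count_inter, Multiset.count_add]
  omega

-- ===== VERDICT (by name: the statement is the Claim_ definition above) =====
theorem findCloseMatch_spec : Claim_equal_findCloseMatch := by
  intro current guess _
  show findCloseMatch current guess = findCloseMatch_alt current guess
  unfold findCloseMatch findCloseMatch_alt
  simp only [pvA_fold, pvB_fold]
  rw [show ((current.zip guess).map Prod.fst).foldl (fun d x => d.modify x 0 (· + 1)) PySem.Dict.empty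
        = PySem.Dict.counter ((current.zip guess).map Prod.fst) from (PySem.Dict.counter_eq_foldl _).symm,
      show ((current.zip guess).map Prod.snd).foldl (fun d x => d.modify x 0 (· + 1)) PySem.Dict.empty
        = PySem.Dict.counter ((current.zip guess).map Prod.snd) from (PySem.Dict.counter_eq_foldl _).symm]
  set P := current.zip guess with hP
  rw [PySem.Dict.keys_counter, PySem.List.foldl_add]
  have hmin : ((PySem.Set.ofList (P.map Prod.fst)).map
      (fun c => min ((PySem.Dict.counter (P.map Prod.fst)).getD c 0)
                    ((PySem.Dict.counter (P.map Prod.snd)).getD c 0))).sum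
      = ((↑(P.map Prod.fst) : Multiset Int) ∩ ↑(P.map Prod.snd)).card := by
    have : ∀ c ∈ PySem.Set.ofList (P.map Prod.fst),
        min ((PySem.Dict.counter (P.map Prod.fst)).getD c 0)
            ((PySem.Dict.counter (P.map Prod.snd)).getD c 0)
          = (((min ((P.map Prod.fst).count c) ((P.map Prod.snd).count c) : Nat) : Int)) := by
      intro c _
      rw [PySem.Dict.getD_counter, PySem.Dict.getD_counter]
      push_cast
      rfl
    rw [List.map_congr_left this, pvSum_cast, pvSum_min_counts]
  rw [hmin]
  -- name the pieces
  set Pe := P.filter (fun p => p.1 == p.2) with hPe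
  set lc := (P.filter (fun p => p.1 != p.2)).map Prod.fst with hlc
  set lg := (P.filter (fun p => p.1 != p.2)).map Prod.snd with hlg
  have hsplit : ((↑(P.map Prod.fst) : Multiset Int) ∩ ↑(P.map Prod.snd))
      = ↑(Pe.map Prod.fst) + (↑lc : Multiset Int) ∩ ↑lg := by
    rw [pvSplit P Prod.fst, pvSplit P Prod.snd, ← hPe, ← hlc, ← hlg]
    rw [show (Pe.map Prod.snd) = Pe.map Prod.fst from (pvEq_part P).symm]
    exact pvInter_add _ _ _
  rw [hsplit]
  have hcount : P.countP (fun p => p.1 == p.2) = Pe.length := by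
    simp [hPe, List.countP_eq_length_filter]
  rw [pvConsume_card, hcount]
  simp

-- ===== end =====
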